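-- pv_equiv track=rewrite | github.com/hahyuning/Coding-test-study | baekjoon/시뮬레이션과 구현 (Hard)/배열/20327 배열 돌리기6.py | operation5
-- ===== SOURCE A (Python) =====
-- def operation5(a, l):
--     n = len(a)
--     ans = [[0] * n for _ in range(n)]
--     sub_size = (1 << l)
--     sub_count = n // sub_size
--     for i in range(sub_count):
--         for j in range(sub_count):
--             x1 = i * sub_size
--             y1 = j * sub_size
--             x2 = (sub_count - i - 1) * sub_size
--             y2 = j * sub_size
--             for x in range(sub_size):
--                 for y in range(sub_size):
--                     ans[x1 + x][y1 + y] = a[x2 + x][y2 + y]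
--     return ans
-- ===== SOURCE B (Python) =====
-- def operation5(a, l):
--     # Row-level view: columns are never permuted, so the flip only permutes rows.
--     # Allocate the n-by-n zero result; the blocks tile the top-left m-by-m region
--     # (m = largest multiple of the block size), and each of its rows is a whole
--     # source row, copied in one slice assignment via a closed-form row permutation.
--     n = len(a)
--     sub_size = 1 << l
--     m = n // sub_size * sub_size
--     ans = [[0] * n for _ in range(n)]
--     for r in range(m):
--         i, x = divmod(r, sub_size)
--         src = (n // sub_size - 1 - i) * sub_size + x
--         ans[r][:m] = a[src][:m]
--     return ans
-- ===== Notes on version B (the rewrite author's own statement) =====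
-- stated objective: simpler
-- what changed: A fills the preallocated n-by-n zero matrix element-by-element with four nested loops over block indices and intra-block offsets; B observes that columns are never permuted, so it makes a single pass over the rows of the m-by-m filled region, computing each row's source index by a closed-form divmod permutation and copying the row in one slice assignment; Pre_ excludes exactly the inputs where A raises (l < 0, or a row indexed inside the filled region shorter than that region).
import Mathlib
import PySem

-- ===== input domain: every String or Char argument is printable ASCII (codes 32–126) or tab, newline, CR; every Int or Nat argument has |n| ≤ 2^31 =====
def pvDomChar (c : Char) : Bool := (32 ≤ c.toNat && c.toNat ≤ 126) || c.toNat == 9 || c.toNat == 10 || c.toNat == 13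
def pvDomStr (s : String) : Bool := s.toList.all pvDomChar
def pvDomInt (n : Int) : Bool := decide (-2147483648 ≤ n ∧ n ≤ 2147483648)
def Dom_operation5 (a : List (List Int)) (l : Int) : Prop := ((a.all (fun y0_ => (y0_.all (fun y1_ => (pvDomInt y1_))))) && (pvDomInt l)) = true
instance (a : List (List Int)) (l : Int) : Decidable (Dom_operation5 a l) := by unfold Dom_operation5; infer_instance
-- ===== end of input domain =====

-- B replaces A's four nested block/offset loops by a single pass over the rows of the
-- filled m×m region, copying each row by a closed-form row permutation; objective: simpler.

-- ===== PORT A =====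
-- set2 M r c v is exactly Python's `M[r][c] = v` for the in-range indices A uses
def set2 (M : List (List Int)) (r c : Nat) (v : Int) : List (List Int) :=
  M.set r ((M.getD r []).set c v)

def operation5 (a : List (List Int)) (l : Int) : List (List Int) :=
  let n := a.length
  let ans := List.replicate n (List.replicate n (0 : Int))
  let subSize := 2 ^ l.toNat          -- 1 << l; Pre_ gives 0 ≤ l (Python raises on l < 0)
  let subCount := n / subSize
  (List.range subCount).foldl (fun ans i =>
    (List.range subCount).foldl (fun ans j =>
      let x1 := i * subSize
      let y1 := j * subSize
      let x2 := (subCount - i - 1) * subSize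
      let y2 := j * subSize
      (List.range subSize).foldl (fun ans x =>
        (List.range subSize).foldl (fun ans y =>
          set2 ans (x1 + x) (y1 + y) ((a.getD (x2 + x) []).getD (y2 + y) 0)) ans) ans) ans) ans

-- ===== PORT B =====
def operation5_alt (a : List (List Int)) (l : Int) : List (List Int) :=
  let n := a.length
  let subSize := 2 ^ l.toNat        -- 1 << l; Pre_ gives 0 ≤ l (Python raises on l < 0)
  let m := n / subSize * subSize
  let ans := List.replicate n (List.replicate n (0 : Int))
  -- ans[r][:m] = a[src][:m] is the slice assignment: new row = copied prefix ++ old tail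
  (List.range m).foldl (fun ans r =>
    ans.set r (((a.getD ((n / subSize - 1 - r / subSize) * subSize + r % subSize) []).take m)
      ++ ((ans.getD r []).drop m))) ans

-- ===== PRECONDITION & SPEC =====
-- Pre_ excludes exactly the inputs where A raises: l < 0 (ValueError from 1 << l) and
-- matrices where some row indexed by A (index < m = (n // 2^l) * 2^l) is shorter than
-- the filled region m (IndexError).
def Pre_operation5 (a : List (List Int)) (l : Int) : Prop :=
  0 ≤ l ∧ ∀ k, k < (a.length / 2 ^ l.toNat) * 2 ^ l.toNat →
    (a.length / 2 ^ l.toNat) * 2 ^ l.toNat ≤ (a.getD k []).length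
instance (a : List (List Int)) (l : Int) : Decidable (Pre_operation5 a l) := by
  unfold Pre_operation5; infer_instance

def pvWitness_operation5 : List (List Int) × Int := ([[1, 2], [3, 4]], 1)

def Spec_operation5 (a : List (List Int)) (l : Int) (out : List (List Int)) : Prop := out = operation5_alt a l
instance (a : List (List Int)) (l : Int) (out : List (List Int)) : Decidable (Spec_operation5 a l out) := by unfold Spec_operation5; infer_instance

-- ===== CLAIM (what is proved, stated in full; the proofs are below) =====
def Claim_equal_operation5 : Prop := ∀ (a : List (List Int)) (l : Int), Dom_operation5 a l → Pre_operation5 a l → Spec_operation5 a l (operation5 a l)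

-- ===== LEMMAS AND PROOFS =====

-- matrix entry read with Python's defaults (out-of-range reads never occur on Pre_)
def g2 (M : List (List Int)) (r c : Nat) : Int := (M.getD r []).getD c 0

-- "M is an n×n matrix"
def MlenN (n : Nat) (M : List (List Int)) : Prop :=
  M.length = n ∧ ∀ row ∈ M, row.length = n

-- the value A writes at cell (r, c) (and that B copies there): a[src r][c]
def tval (a : List (List Int)) (S C r c : Nat) : Int :=
  (a.getD ((C - r / S - 1) * S + r % S) []).getD c 0

lemma cell_lt {C S i x : Nat} (hi : i < C) (hx : x < S) : i * S + x < C * S :=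
  calc i * S + x < i * S + S := by omega
    _ = (i + 1) * S := (Nat.succ_mul i S).symm
    _ ≤ C * S := Nat.mul_le_mul_right S hi

lemma getD_set_self {α : Type} {l : List α} {i : Nat} (h : i < l.length) (a d : α) :
    (l.set i a).getD i d = a := by
  rw [List.getD_eq_getElem?_getD, List.getElem?_set_self h]
  rfl

lemma getD_set_ne {α : Type} {l : List α} {i j : Nat} (h : i ≠ j) (a : α) (d : α) :
    (l.set i a).getD j d = l.getD j d := by
  rw [List.getD_eq_getElem?_getD, List.getElem?_set_ne h, ← List.getD_eq_getElem?_getD]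

lemma MlenN_set2 {n : Nat} {M : List (List Int)} (hM : MlenN n M) {r c : Nat}
    (hr : r < n) (_hc : c < n) (v : Int) : MlenN n (set2 M r c v) := by
  obtain ⟨hlen, hrow⟩ := hM
  refine ⟨by simp [set2, hlen], ?_⟩
  intro row hmem
  rcases List.mem_or_eq_of_mem_set hmem with h | h
  · exact hrow _ h
  · subst h
    rw [List.length_set]
    exact hrow _ (List.getD_eq_getElem M [] (by omega : r < M.length) ▸ List.getElem_mem _)

lemma g2_set2 {n : Nat} {M : List (List Int)} (hM : MlenN n M) {r c : Nat}
    (hr : r < n) (hc : c < n) (v : Int) (r' c' : Nat) :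
    g2 (set2 M r c v) r' c' = if r' = r ∧ c' = c then v else g2 M r' c' := by
  obtain ⟨hlen, hrow⟩ := hM
  have hrM : r < M.length := by omega
  have hrowlen : (M.getD r []).length = n := by
    rw [List.getD_eq_getElem M [] hrM]
    exact hrow _ (List.getElem_mem _)
  by_cases h1 : r' = r
  · subst h1
    unfold g2 set2
    rw [getD_set_self hrM]
    by_cases h2 : c' = c
    · subst h2
      rw [getD_set_self (by omega)]
      simp
    · rw [getD_set_ne (fun h => h2 h.symm)]
      simp [h2]
  · unfold g2 set2
    rw [getD_set_ne (fun h => h1 h.symm)]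
    simp [h1]

lemma MlenN_zero (n : Nat) : MlenN n (List.replicate n (List.replicate n (0 : Int))) := by
  constructor
  · simp
  · intro row h
    rw [List.eq_of_mem_replicate h]
    simp

lemma g2_zero (n r c : Nat) : g2 (List.replicate n (List.replicate n (0 : Int))) r c = 0 := by
  unfold g2
  simp only [List.getD_eq_getElem?_getD, List.getElem?_replicate]
  split <;> simp

lemma mat_ext {n : Nat} {M M' : List (List Int)} (h : MlenN n M) (h' : MlenN n M')
    (hg : ∀ r c, r < n → c < n → g2 M r c = g2 M' r c) : M = M' := by
  obtain ⟨hl, hr⟩ := h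
  obtain ⟨hl', hr'⟩ := h'
  apply List.ext_getElem (by omega)
  intro r h1 h2
  have hrn : r < n := by omega
  have e1 : M[r].length = n := hr _ (List.getElem_mem _)
  have e2 : M'[r].length = n := hr' _ (List.getElem_mem _)
  apply List.ext_getElem (by omega)
  intro c hc1 hc2
  have := hg r c hrn (by omega)
  unfold g2 at this
  rwa [List.getD_eq_getElem M [] h1, List.getD_eq_getElem M' [] h2,
    List.getD_eq_getElem _ _ hc1, List.getD_eq_getElem _ _ hc2] at this

lemma loopY (a : List (List Int)) (n S C i j x : Nat) (hm : C * S ≤ n)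
    (hi : i < C) (hj : j < C) (hx : x < S)
    (t : Nat) (ht : t ≤ S) (M : List (List Int)) (hM : MlenN n M) :
    MlenN n ((List.range t).foldl
      (fun ans y => set2 ans (i * S + x) (j * S + y)
        ((a.getD ((C - i - 1) * S + x) []).getD (j * S + y) 0)) M) ∧
    ∀ r c, g2 ((List.range t).foldl
      (fun ans y => set2 ans (i * S + x) (j * S + y)
        ((a.getD ((C - i - 1) * S + x) []).getD (j * S + y) 0)) M) r c =
      if r = i * S + x ∧ j * S ≤ c ∧ c < j * S + t
      then (a.getD ((C - i - 1) * S + x) []).getD c 0 else g2 M r c := by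
  induction t with
  | zero =>
    refine ⟨by simpa using hM, ?_⟩
    intro r c
    simp only [List.range_zero, List.foldl_nil]
    split_ifs with h
    · omega
    · rfl
  | succ t ih =>
    obtain ⟨ih1, ih2⟩ := ih (by omega)
    rw [List.range_succ, List.foldl_append]
    simp only [List.foldl_cons, List.foldl_nil]
    have hrow : i * S + x < n := lt_of_lt_of_le (cell_lt hi hx) hm
    have hcol : j * S + t < n := lt_of_lt_of_le (cell_lt hj (by omega)) hm
    refine ⟨MlenN_set2 ih1 hrow hcol _, ?_⟩
    intro r c
    rw [g2_set2 ih1 hrow hcol _ r c, ih2]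
    by_cases h1 : r = i * S + x ∧ c = j * S + t
    · obtain ⟨e1, e2⟩ := h1
      subst e1; subst e2
      rw [if_pos ⟨rfl, rfl⟩, if_pos ⟨rfl, by omega, by omega⟩]
    · rw [if_neg h1]
      split_ifs with h2 h3 h3
      · rfl
      · omega
      · omega
      · rfl

lemma loopX (a : List (List Int)) (n S C i j : Nat) (hm : C * S ≤ n)
    (hi : i < C) (hj : j < C)
    (t : Nat) (ht : t ≤ S) (M : List (List Int)) (hM : MlenN n M) :
    MlenN n ((List.range t).foldl (fun ans x =>
      (List.range S).foldl
        (fun ans y => set2 ans (i * S + x) (j * S + y)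
          ((a.getD ((C - i - 1) * S + x) []).getD (j * S + y) 0)) ans) M) ∧
    ∀ r c, g2 ((List.range t).foldl (fun ans x =>
      (List.range S).foldl
        (fun ans y => set2 ans (i * S + x) (j * S + y)
          ((a.getD ((C - i - 1) * S + x) []).getD (j * S + y) 0)) ans) M) r c =
      if i * S ≤ r ∧ r < i * S + t ∧ j * S ≤ c ∧ c < j * S + S
      then tval a S C r c else g2 M r c := by
  induction t with
  | zero =>
    refine ⟨by simpa using hM, ?_⟩
    intro r c
    simp only [List.range_zero, List.foldl_nil]
    split_ifs with h
    · omega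
    · rfl
  | succ t ih =>
    obtain ⟨ih1, ih2⟩ := ih (by omega)
    rw [List.range_succ, List.foldl_append]
    simp only [List.foldl_cons, List.foldl_nil]
    obtain ⟨y1, y2⟩ := loopY a n S C i j t hm hi hj (by omega) S le_rfl _ ih1
    refine ⟨y1, ?_⟩
    intro r c
    rw [y2 r c, ih2]
    have hdiv : (i * S + t) / S = i := by
      rw [Nat.mul_comm, Nat.mul_add_div (by omega : 0 < S), Nat.div_eq_of_lt (by omega : t < S)]
      omega
    have hmod : (i * S + t) % S = t := by
      rw [Nat.mul_comm i S, Nat.mul_add_mod, Nat.mod_eq_of_lt (by omega : t < S)]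
    have hsrc : (C - i - 1) * S + t =
        (C - (i * S + t) / S - 1) * S + (i * S + t) % S := by
      rw [hdiv, hmod]
    by_cases hr : r = i * S + t
    · subst hr
      by_cases hcols : j * S ≤ c ∧ c < j * S + S
      · rw [if_pos ⟨rfl, hcols.1, hcols.2⟩, if_pos ⟨by omega, by omega, hcols.1, hcols.2⟩]
        unfold tval
        rw [hsrc]
      · rw [if_neg (fun h => hcols ⟨h.2.1, h.2.2⟩)]
        split_ifs with h2 h3 h3
        · rfl
        · omega
        · omega
        · rfl
    · rw [if_neg (fun h => hr h.1)]
      split_ifs with h2 h3 h3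
      · rfl
      · omega
      · omega
      · rfl

lemma loopJ (a : List (List Int)) (n S C i : Nat) (hm : C * S ≤ n) (hi : i < C)
    (t : Nat) (ht : t ≤ C) (M : List (List Int)) (hM : MlenN n M) :
    MlenN n ((List.range t).foldl (fun ans j =>
      (List.range S).foldl (fun ans x =>
        (List.range S).foldl
          (fun ans y => set2 ans (i * S + x) (j * S + y)
            ((a.getD ((C - i - 1) * S + x) []).getD (j * S + y) 0)) ans) ans) M) ∧
    ∀ r c, g2 ((List.range t).foldl (fun ans j =>
      (List.range S).foldl (fun ans x =>
        (List.range S).foldl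
          (fun ans y => set2 ans (i * S + x) (j * S + y)
            ((a.getD ((C - i - 1) * S + x) []).getD (j * S + y) 0)) ans) ans) M) r c =
      if i * S ≤ r ∧ r < i * S + S ∧ c < t * S
      then tval a S C r c else g2 M r c := by
  induction t with
  | zero =>
    refine ⟨by simpa using hM, ?_⟩
    intro r c
    simp only [List.range_zero, List.foldl_nil]
    split_ifs with h
    · omega
    · rfl
  | succ t ih =>
    obtain ⟨ih1, ih2⟩ := ih (by omega)
    rw [List.range_succ, List.foldl_append]
    simp only [List.foldl_cons, List.foldl_nil]
    obtain ⟨x1, x2⟩ := loopX a n S C i t hm hi (by omega) S le_rfl _ ih1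
    refine ⟨x1, ?_⟩
    intro r c
    rw [x2 r c, ih2, Nat.succ_mul]
    split_ifs with h1 h2 h2 h3 h3 <;> first | rfl | omega

lemma loopI (a : List (List Int)) (n S C : Nat) (hm : C * S ≤ n)
    (t : Nat) (ht : t ≤ C) (M : List (List Int)) (hM : MlenN n M) :
    MlenN n ((List.range t).foldl (fun ans i =>
      (List.range C).foldl (fun ans j =>
        (List.range S).foldl (fun ans x =>
          (List.range S).foldl
            (fun ans y => set2 ans (i * S + x) (j * S + y)
              ((a.getD ((C - i - 1) * S + x) []).getD (j * S + y) 0)) ans) ans) ans) M) ∧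
    ∀ r c, g2 ((List.range t).foldl (fun ans i =>
      (List.range C).foldl (fun ans j =>
        (List.range S).foldl (fun ans x =>
          (List.range S).foldl
            (fun ans y => set2 ans (i * S + x) (j * S + y)
              ((a.getD ((C - i - 1) * S + x) []).getD (j * S + y) 0)) ans) ans) ans) M) r c =
      if r < t * S ∧ c < C * S then tval a S C r c else g2 M r c := by
  induction t with
  | zero =>
    refine ⟨by simpa using hM, ?_⟩
    intro r c
    simp only [List.range_zero, List.foldl_nil]
    split_ifs with h
    · omega
    · rfl
  | succ t ih =>
    obtain ⟨ih1, ih2⟩ := ih (by omega)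
    rw [List.range_succ, List.foldl_append]
    simp only [List.foldl_cons, List.foldl_nil]
    obtain ⟨j1, j2⟩ := loopJ a n S C t hm (by omega) C le_rfl _ ih1
    refine ⟨j1, ?_⟩
    intro r c
    rw [j2 r c, ih2, Nat.succ_mul]
    split_ifs with h1 h2 h2 h3 h3 <;> first | rfl | omega

lemma opA_char (a : List (List Int)) (l : Int) :
    MlenN a.length (operation5 a l) ∧
    ∀ r c, g2 (operation5 a l) r c =
      if r < (a.length / 2 ^ l.toNat) * 2 ^ l.toNat ∧
         c < (a.length / 2 ^ l.toNat) * 2 ^ l.toNat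
      then tval a (2 ^ l.toNat) (a.length / 2 ^ l.toNat) r c else 0 := by
  have hA : operation5 a l =
      (List.range (a.length / 2 ^ l.toNat)).foldl (fun ans i =>
        (List.range (a.length / 2 ^ l.toNat)).foldl (fun ans j =>
          (List.range (2 ^ l.toNat)).foldl (fun ans x =>
            (List.range (2 ^ l.toNat)).foldl
              (fun ans y => set2 ans (i * 2 ^ l.toNat + x) (j * 2 ^ l.toNat + y)
                ((a.getD ((a.length / 2 ^ l.toNat - i - 1) * 2 ^ l.toNat + x) []).getD
                  (j * 2 ^ l.toNat + y) 0)) ans) ans) ans)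
        (List.replicate a.length (List.replicate a.length (0 : Int))) := rfl
  rw [hA]
  obtain ⟨h1, h2⟩ := loopI a a.length (2 ^ l.toNat) (a.length / 2 ^ l.toNat)
    (Nat.div_mul_le_self _ _) (a.length / 2 ^ l.toNat) le_rfl _ (MlenN_zero a.length)
  refine ⟨h1, ?_⟩
  intro r c
  rw [h2 r c, g2_zero]

lemma src_lt {S C r : Nat} (hr : r < C * S) : (C - 1 - r / S) * S + r % S < C * S := by
  have hS : 0 < S := by by_contra h; simp [Nat.le_zero.mp (Nat.not_lt.mp h)] at hr
  have hdiv : r / S < C := (Nat.div_lt_iff_lt_mul hS).mpr hr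
  have h1 : C - 1 - r / S < C := by
    generalize r / S = q at hdiv ⊢
    omega
  exact cell_lt h1 (Nat.mod_lt _ hS)

-- the loop of B: after t rows, rows below t carry their source row, rows from t on are still zero
lemma loopB (a : List (List Int)) (n S C : Nat) (hm : C * S ≤ n)
    (hPre : ∀ k, k < C * S → C * S ≤ (a.getD k []).length)
    (t : Nat) (ht : t ≤ C * S) :
    MlenN n ((List.range t).foldl (fun ans r =>
      ans.set r (((a.getD ((C - 1 - r / S) * S + r % S) []).take (C * S))
        ++ ((ans.getD r []).drop (C * S))))
      (List.replicate n (List.replicate n (0 : Int)))) ∧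
    (∀ r, t ≤ r → r < n → ((List.range t).foldl (fun ans r =>
      ans.set r (((a.getD ((C - 1 - r / S) * S + r % S) []).take (C * S))
        ++ ((ans.getD r []).drop (C * S))))
      (List.replicate n (List.replicate n (0 : Int)))).getD r [] = List.replicate n 0) ∧
    (∀ r c, g2 ((List.range t).foldl (fun ans r =>
      ans.set r (((a.getD ((C - 1 - r / S) * S + r % S) []).take (C * S))
        ++ ((ans.getD r []).drop (C * S))))
      (List.replicate n (List.replicate n (0 : Int)))) r c =
      if r < t ∧ c < C * S then tval a S C r c else 0) := by
  induction t with
  | zero =>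
    refine ⟨MlenN_zero n, ?_, ?_⟩
    · intro r _ hrn
      simp only [List.range_zero, List.foldl_nil]
      rw [List.getD_eq_getElem?_getD]
      simp only [List.getElem?_replicate]
      rw [if_pos hrn]
      rfl
    · intro r c
      simp only [List.range_zero, List.foldl_nil]
      rw [g2_zero]
      split_ifs with h
      · omega
      · rfl
  | succ t ih =>
    obtain ⟨ih1, ih2, ih3⟩ := ih (by omega)
    rw [List.range_succ, List.foldl_append]
    simp only [List.foldl_cons, List.foldl_nil]
    have htCS : t < C * S := by omega
    have hsrc : (C - 1 - t / S) * S + t % S < C * S := src_lt htCS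
    have hlen : C * S ≤ (a.getD ((C - 1 - t / S) * S + t % S) []).length := hPre _ hsrc
    have hrowt := ih2 t le_rfl (by omega)
    set M := (List.range t).foldl (fun ans r =>
      ans.set r (((a.getD ((C - 1 - r / S) * S + r % S) []).take (C * S))
        ++ ((ans.getD r []).drop (C * S))))
      (List.replicate n (List.replicate n (0 : Int))) with hM
    have hMlen : M.length = n := ih1.1
    have hnew : ((a.getD ((C - 1 - t / S) * S + t % S) []).take (C * S))
        ++ ((M.getD t []).drop (C * S))
        = ((a.getD ((C - 1 - t / S) * S + t % S) []).take (C * S))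
          ++ List.replicate (n - C * S) (0 : Int) := by
      rw [hrowt, List.drop_replicate]
    have htake : ((a.getD ((C - 1 - t / S) * S + t % S) []).take (C * S)).length = C * S := by
      rw [List.length_take]
      omega
    have hnewlen : (((a.getD ((C - 1 - t / S) * S + t % S) []).take (C * S))
        ++ List.replicate (n - C * S) (0 : Int)).length = n := by
      rw [List.length_append, List.length_replicate, htake]
      omega
    refine ⟨?_, ?_, ?_⟩
    · rw [hnew]
      constructor
      · rw [List.length_set, hMlen]
      · intro row hrow
        rcases List.mem_or_eq_of_mem_set hrow with h | h
        · exact ih1.2 _ h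
        · rw [h, hnewlen]
    · intro r hr hrn
      rw [hnew, getD_set_ne (by omega : t ≠ r)]
      exact ih2 r (by omega) hrn
    · intro r c
      by_cases hrt : r = t
      · subst hrt
        unfold g2
        rw [hnew, getD_set_self (by omega : r < M.length)]
        by_cases hc : c < C * S
        · rw [if_pos ⟨by omega, hc⟩, List.getD_eq_getElem?_getD,
            List.getElem?_append_left (by omega), ← List.getD_eq_getElem?_getD,
            List.getD_eq_getElem _ _ (by omega : c < ((a.getD ((C - 1 - r / S) * S + r % S) []).take (C * S)).length),
            List.getElem_take]
          unfold tval
          rw [show C - r / S - 1 = C - 1 - r / S from by omega,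
            List.getD_eq_getElem _ _ (by omega : c < (a.getD ((C - 1 - r / S) * S + r % S) []).length)]
        · rw [if_neg (fun h => hc h.2), List.getD_eq_getElem?_getD,
            List.getElem?_append_right (by omega)]
          rw [htake]
          simp only [List.getElem?_replicate]
          split <;> simp
      · unfold g2
        rw [hnew, getD_set_ne (fun h => hrt h.symm)]
        have := ih3 r c
        unfold g2 at this
        rw [this]
        split_ifs with h1 h2 h2
        · rfl
        · omega
        · omega
        · rfl

lemma opB_char (a : List (List Int)) (l : Int)
    (hPre : ∀ k, k < (a.length / 2 ^ l.toNat) * 2 ^ l.toNat →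
      (a.length / 2 ^ l.toNat) * 2 ^ l.toNat ≤ (a.getD k []).length) :
    MlenN a.length (operation5_alt a l) ∧
    ∀ r c, g2 (operation5_alt a l) r c =
      if r < (a.length / 2 ^ l.toNat) * 2 ^ l.toNat ∧
         c < (a.length / 2 ^ l.toNat) * 2 ^ l.toNat
      then tval a (2 ^ l.toNat) (a.length / 2 ^ l.toNat) r c else 0 := by
  have hB : operation5_alt a l =
      (List.range ((a.length / 2 ^ l.toNat) * 2 ^ l.toNat)).foldl (fun ans r =>
        ans.set r (((a.getD ((a.length / 2 ^ l.toNat - 1 - r / 2 ^ l.toNat) * 2 ^ l.toNat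
            + r % 2 ^ l.toNat) []).take ((a.length / 2 ^ l.toNat) * 2 ^ l.toNat))
          ++ ((ans.getD r []).drop ((a.length / 2 ^ l.toNat) * 2 ^ l.toNat))))
        (List.replicate a.length (List.replicate a.length (0 : Int))) := rfl
  rw [hB]
  obtain ⟨h1, _, h3⟩ := loopB a a.length (2 ^ l.toNat) (a.length / 2 ^ l.toNat)
    (Nat.div_mul_le_self _ _) hPre
    ((a.length / 2 ^ l.toNat) * 2 ^ l.toNat) le_rfl
  exact ⟨h1, h3⟩

-- ===== VERDICT (by name: the statement is the Claim_ definition above) =====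
theorem operation5_spec : Claim_equal_operation5 := by
  intro a l _hDom hPre
  unfold Spec_operation5
  obtain ⟨_, hPreLen⟩ := hPre
  obtain ⟨hA1, hA2⟩ := opA_char a l
  obtain ⟨hB1, hB2⟩ := opB_char a l hPreLen
  exact mat_ext hA1 hB1 (fun r c _ _ => by rw [hA2, hB2])
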